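-- pv_equiv track=rewrite | github.com/glasgowshipyard/obfuscii | obfuscii/vid.py | fits_spatial_context
-- ===== SOURCE A (Python) =====
-- from typing import List, Tuple, Optional
--
-- def fits_spatial_context(char: str, context_chars: List[str]) -> bool:
--     """Check if character fits well with spatial context"""
--
--     if not context_chars:
--         return True  # No context to check against
--
--     # Count character frequencies in context
--     char_counts = {}
--     for ctx_char in context_chars:
--         char_counts[ctx_char] = char_counts.get(ctx_char, 0) + 1
--
--     # Character fits if it appears in context or is adjacent to common context chars
--     if char in char_counts:
--         return True
--
--     # Check if character is adjacent to common context characters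
--     ascii_order = [' ', '.', ':', '-', '=', '+', '*', '#', '%', '@']
--
--     try:
--         char_idx = ascii_order.index(char)
--
--         for ctx_char, count in char_counts.items():
--             if count >= len(context_chars) // 4:  # Reasonably common in context
--                 try:
--                     ctx_idx = ascii_order.index(ctx_char)
--                     if abs(char_idx - ctx_idx) <= 1:  # Adjacent characters
--                         return True
--                 except ValueError:
--                     continue
--
--     except ValueError:
--         # Character not in progression
--         pass
--
--     return False
-- ===== SOURCE B (Python) =====
-- from typing import List
--
-- def fits_spatial_context(char: str, context_chars: List[str]) -> bool:
--     """Check if character fits well with spatial context (neighbor-lookup version)."""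
--     if not context_chars:
--         return True
--     if char in context_chars:
--         return True
--     ascii_order = [' ', '.', ':', '-', '=', '+', '*', '#', '%', '@']
--     if char not in ascii_order:
--         return False
--     char_idx = ascii_order.index(char)
--     threshold = max(1, len(context_chars) // 4)
--     for j in (char_idx - 1, char_idx + 1):
--         if 0 <= j <= 9 and context_chars.count(ascii_order[j]) >= threshold:
--             return True
--     return False
-- ===== Notes on version B (the rewrite author's own statement) =====
-- stated objective: simpler
-- what changed: Instead of building a frequency dict and scanning all its entries against the ascii table, B checks membership directly and only counts the two ascii-table neighbors of char, with a single max(1, len//4) threshold.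
import Mathlib
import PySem

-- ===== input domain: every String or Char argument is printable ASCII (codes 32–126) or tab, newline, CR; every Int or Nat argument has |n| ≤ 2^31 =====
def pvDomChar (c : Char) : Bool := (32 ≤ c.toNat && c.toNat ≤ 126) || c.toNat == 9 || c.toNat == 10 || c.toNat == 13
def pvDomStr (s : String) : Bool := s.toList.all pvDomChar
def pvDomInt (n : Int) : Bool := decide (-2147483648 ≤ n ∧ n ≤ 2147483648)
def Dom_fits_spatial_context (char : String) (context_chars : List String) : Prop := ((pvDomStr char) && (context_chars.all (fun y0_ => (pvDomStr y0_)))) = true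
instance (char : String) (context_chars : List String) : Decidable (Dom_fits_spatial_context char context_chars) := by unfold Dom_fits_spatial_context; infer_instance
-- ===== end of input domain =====

-- B checks membership in the context directly and counts only the two ascii-table
-- neighbors of char (threshold max(1, len//4)), instead of building a frequency dict
-- and scanning all its entries against the table; objective: simpler.

-- the ASCII density progression used by both versions (a shared constant)
def pvAsciiOrder : List String := [" ", ".", ":", "-", "=", "+", "*", "#", "%", "@"]

-- ===== PORT A =====
def fits_spatial_context (char : String) (context_chars : List String) : Bool :=
  if context_chars = [] then true
  else
    -- char_counts[ctx_char] = char_counts.get(ctx_char, 0) + 1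
    let char_counts : PySem.Dict String Int :=
      context_chars.foldl (fun d c => d.insert c (d.getD c 0 + 1)) PySem.Dict.empty
    if char_counts.contains char then true
    else
      match PySem.List.index? pvAsciiOrder char with
      | none => false
      | some char_idx =>
        -- for ctx_char, count in char_counts.items(): early `return True` = any
        char_counts.items.any (fun p =>
          if p.2 ≥ PySem.Int.floordiv (context_chars.length : Int) 4 then
            match PySem.List.index? pvAsciiOrder p.1 with
            | none => false
            | some ctx_idx => decide (((char_idx : Int) - (ctx_idx : Int)).natAbs ≤ 1)
          else false)

-- ===== PORT B =====
def fits_spatial_context_alt (char : String) (context_chars : List String) : Bool :=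
  if context_chars = [] then true
  else if context_chars.contains char then true
  else
    match PySem.List.index? pvAsciiOrder char with
    | none => false
    | some char_idx =>
      let threshold : Int := max 1 (PySem.Int.floordiv (context_chars.length : Int) 4)
      [(char_idx : Int) - 1, (char_idx : Int) + 1].any (fun j =>
        decide (0 ≤ j) && decide (j ≤ 9) &&
          decide (PySem.List.count context_chars (pvAsciiOrder.getD j.toNat "") ≥ threshold))

-- ===== PRECONDITION & SPEC =====
def Spec_fits_spatial_context (char : String) (context_chars : List String) (out : Bool) : Prop := out = fits_spatial_context_alt char context_chars
instance (char : String) (context_chars : List String) (out : Bool) : Decidable (Spec_fits_spatial_context char context_chars out) := by unfold Spec_fits_spatial_context; infer_instance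

-- ===== CLAIM (what is proved, stated in full; the proofs are below) =====
def Claim_equal_fits_spatial_context : Prop := ∀ (char : String) (context_chars : List String), Dom_fits_spatial_context char context_chars → Spec_fits_spatial_context char context_chars (fits_spatial_context char context_chars)

-- ===== LEMMAS AND PROOFS =====

-- the table indexes itself: looking up its j-th element gives back j
lemma pvAsciiOrder_index_self : ∀ j : Fin 10, PySem.List.index? pvAsciiOrder (pvAsciiOrder.getD (j : Nat) "") = some (j : Nat) := by decide

lemma pvAsciiOrder_len : pvAsciiOrder.length = 10 := by decide

-- main equivalence in the non-trivial branch
lemma pv_main (char : String) (ctx : List String) (i : Nat)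
    (hmem : char ∉ ctx) (hidx : PySem.List.index? pvAsciiOrder char = some i) :
    ((ctx.foldl (fun d c => d.insert c (d.getD c 0 + 1)) PySem.Dict.empty).items.any (fun p =>
        if p.2 ≥ PySem.Int.floordiv (ctx.length : Int) 4 then
          match PySem.List.index? pvAsciiOrder p.1 with
          | none => false
          | some ctx_idx => decide (((i : Int) - (ctx_idx : Int)).natAbs ≤ 1)
        else false))
    = ([(i : Int) - 1, (i : Int) + 1].any (fun j =>
        decide (0 ≤ j) && decide (j ≤ 9) &&
          decide ((PySem.List.count ctx (pvAsciiOrder.getD j.toNat "") : Int) ≥ max 1 (PySem.Int.floordiv (ctx.length : Int) 4)))) := by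
  have hfold : (List.foldl (fun (d : PySem.Dict String Int) c => d.insert c (d.getD c 0 + 1)) PySem.Dict.empty ctx) = PySem.Dict.counter ctx := by
    rw [PySem.Dict.foldl_insert_getD_add_one_eq_counter]
  rw [hfold, PySem.Dict.items_counter]
  obtain ⟨hi10, hchar, -⟩ := PySem.List.getElem_of_index?_eq_some hidx
  rw [pvAsciiOrder_len] at hi10
  rw [Bool.eq_iff_iff]
  simp only [List.any_eq_true, List.any_map, Function.comp]
  constructor
  · rintro ⟨k, hk, hp⟩
    rw [PySem.Set.mem_ofList _ _] at hk
    split_ifs at hp with hcnt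
    · rcases hj : PySem.List.index? pvAsciiOrder k with _ | j
      · rw [hj] at hp; simp at hp
      · rw [hj] at hp
        simp only [decide_eq_true_eq] at hp
        obtain ⟨hj10, hkj, -⟩ := PySem.List.getElem_of_index?_eq_some hj
        rw [pvAsciiOrder_len] at hj10
        have hne : j ≠ i := by
          intro h; subst h; rw [hkj] at hchar; exact hmem (hchar ▸ hk)
        have hjint : (j : Int) = (i : Int) - 1 ∨ (j : Int) = (i : Int) + 1 := by omega
        refine ⟨(j : Int), by rcases hjint with h | h <;> simp [h], ?_⟩
        have hget : pvAsciiOrder.getD ((j : Int)).toNat "" = k := by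
          simp only [Int.toNat_natCast, List.getD]
          rw [List.getElem?_eq_getElem (show j < pvAsciiOrder.length by rw [pvAsciiOrder_len]; omega)]
          simpa using hkj
        have h1 : 0 < List.count k ctx := List.count_pos_iff.2 hk
        simp only [hget, PySem.List.count_eq, Bool.and_eq_true, decide_eq_true_eq]
        refine ⟨⟨by omega, by omega⟩, ?_⟩
        exact max_le (by exact_mod_cast h1) hcnt
  · rintro ⟨j, hjm, hp⟩
    simp only [Bool.and_eq_true, decide_eq_true_eq] at hp
    obtain ⟨⟨hj0, hj9⟩, hcnt⟩ := hp
    rw [PySem.List.count_eq] at hcnt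
    set k := pvAsciiOrder.getD j.toNat "" with hkdef
    have h1 : (1 : Int) ≤ (List.count k ctx : Int) := le_trans (le_max_left _ _) hcnt
    have hkmem : k ∈ ctx := by
      rcases Nat.eq_zero_or_pos (List.count k ctx) with h | h
      · rw [h] at h1; norm_num at h1
      · exact List.count_pos_iff.1 h
    refine ⟨k, (PySem.Set.mem_ofList _ _).2 hkmem, ?_⟩
    have hcnt2 : (List.count k ctx : Int) ≥ PySem.Int.floordiv (ctx.length : Int) 4 :=
      le_trans (le_max_right _ _) hcnt
    have hjfin : j.toNat < 10 := by omega
    have hjidx : PySem.List.index? pvAsciiOrder (pvAsciiOrder.getD j.toNat "") = some j.toNat :=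
      pvAsciiOrder_index_self ⟨j.toNat, hjfin⟩
    rw [if_pos hcnt2, hkdef, hjidx]
    simp only [decide_eq_true_eq]
    simp only [List.mem_cons, List.not_mem_nil, or_false] at hjm
    rcases hjm with h | h <;> omega

theorem fits_spatial_context_spec : Claim_equal_fits_spatial_context := by
  intro char ctx _
  unfold Spec_fits_spatial_context fits_spatial_context fits_spatial_context_alt
  by_cases hne : ctx = []
  · simp [hne]
  · simp only [hne, if_false]
    have hfold : List.foldl (fun (d : PySem.Dict String Int) c => d.insert c (d.getD c 0 + 1)) PySem.Dict.empty ctx = PySem.Dict.counter ctx := by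
      rw [PySem.Dict.foldl_insert_getD_add_one_eq_counter]
    by_cases hmem : char ∈ ctx
    · have hA : (List.foldl (fun (d : PySem.Dict String Int) c => d.insert c (d.getD c 0 + 1)) PySem.Dict.empty ctx).contains char = true := by
        rw [hfold, PySem.Dict.contains_counter]
        simpa using hmem
      have hB : ctx.contains char = true := by simpa using hmem
      simp only [hA, hB, if_true]
    · have hA : (List.foldl (fun (d : PySem.Dict String Int) c => d.insert c (d.getD c 0 + 1)) PySem.Dict.empty ctx).contains char = false := by
        rw [hfold, PySem.Dict.contains_counter]
        simpa using hmem
      have hB : ctx.contains char = false := by simpa using hmem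
      simp only [hA, hB, if_false, Bool.false_eq_true]
      rcases hidx : PySem.List.index? pvAsciiOrder char with _ | i
      · rfl
      · exact pv_main char ctx i hmem hidx
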